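-- pv_equiv track=rewrite | github.com/progra-utfsm/ejercicios | python/tuplas/supermercado.py | total_ventas_del_mes
-- ===== SOURCE A (Python) =====
-- def total_ventas_del_mes(year, month, itemes, productos, ventas):
--     total = 0 # Acumulador del total
--     for boleta, fecha, rut in ventas: # Recorremos las ventas
--         año, mes, dia = fecha # Desempaquetamos la fecha
--         if año == year and mes == month: # Filtramos por fecha
--             for bol, prod, cant in itemes: # Recorremos los itemes para encontrar las boletas de la fecha
--                 if bol == boleta: # Filtramos por boleta
--                     for producto in productos: # buscamos la informacion del producto
--                         id_producto, _, precio, _ = producto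
--                         if id_producto == prod: # Si el producto corresponde a la boleta analizada
--                             total += cant * precio # Sumamos
--     return total
-- ===== SOURCE B (Python) =====
-- def total_ventas_del_mes(year, month, itemes, productos, ventas):
--     # How many times each boleta was emitted in the requested month
--     boletas = {}
--     for boleta, (ano, mes, dia), rut in ventas:
--         if ano == year and mes == month:
--             boletas[boleta] = boletas.get(boleta, 0) + 1
--     # Units of each product sold through those boletas
--     qty = {}
--     for bol, prod, cant in itemes:
--         if bol in boletas:
--             qty[prod] = qty.get(prod, 0) + cant * boletas[bol]
--     # Price every catalogue row
--     return sum(precio * qty.get(id_producto, 0) for id_producto, _, precio, _ in productos)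
-- ===== Notes on version B (the rewrite author's own statement) =====
-- stated objective: faster
-- what changed: Replaces the triple nested scan with three single passes: count boleta multiplicities for the month, aggregate units per product over itemes, then price each catalogue row once.
import Mathlib
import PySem

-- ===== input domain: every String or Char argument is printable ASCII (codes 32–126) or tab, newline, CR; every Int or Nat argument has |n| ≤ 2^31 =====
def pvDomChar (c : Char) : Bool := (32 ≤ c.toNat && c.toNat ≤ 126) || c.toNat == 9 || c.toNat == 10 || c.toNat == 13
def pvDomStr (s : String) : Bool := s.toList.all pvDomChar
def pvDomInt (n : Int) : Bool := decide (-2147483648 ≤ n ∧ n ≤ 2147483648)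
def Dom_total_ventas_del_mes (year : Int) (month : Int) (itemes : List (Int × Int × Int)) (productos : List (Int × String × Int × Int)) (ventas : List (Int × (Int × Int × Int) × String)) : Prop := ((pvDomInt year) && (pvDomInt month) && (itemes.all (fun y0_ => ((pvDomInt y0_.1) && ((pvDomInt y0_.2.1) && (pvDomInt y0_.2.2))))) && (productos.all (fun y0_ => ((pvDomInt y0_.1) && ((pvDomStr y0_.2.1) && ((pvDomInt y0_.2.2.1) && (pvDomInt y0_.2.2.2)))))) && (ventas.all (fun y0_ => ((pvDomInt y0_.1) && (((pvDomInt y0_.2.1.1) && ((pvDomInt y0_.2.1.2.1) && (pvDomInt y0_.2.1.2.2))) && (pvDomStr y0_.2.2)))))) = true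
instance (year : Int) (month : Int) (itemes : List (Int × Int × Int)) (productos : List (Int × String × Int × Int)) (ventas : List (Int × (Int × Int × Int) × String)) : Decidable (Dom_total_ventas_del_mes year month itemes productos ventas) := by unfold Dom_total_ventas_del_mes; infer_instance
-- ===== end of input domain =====

-- B replaces A's triple nested scan with three single passes (boleta multiplicities for the month,
-- units per product, price each catalogue row) — objective: faster.

-- ===== PORT A =====
-- literal transliteration of A's three nested loops
def total_ventas_del_mes (year : Int) (month : Int) (itemes : List (Int × Int × Int)) (productos : List (Int × String × Int × Int)) (ventas : List (Int × (Int × Int × Int) × String)) : Int :=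
  ventas.foldl (fun total v =>
    let boleta := v.1
    let ano := v.2.1.1
    let mes := v.2.1.2.1
    if ano == year && mes == month then
      itemes.foldl (fun t it =>
        let bol := it.1
        let prod := it.2.1
        let cant := it.2.2
        if bol == boleta then
          productos.foldl (fun t2 p =>
            let id_producto := p.1
            let precio := p.2.2.1
            if id_producto == prod then t2 + cant * precio else t2) t
        else t) total
    else total) 0

-- ===== PORT B =====
-- boletas[boleta] = number of ventas of the requested month with that boleta
def pvBoletasIdx (year month : Int) (ventas : List (Int × (Int × Int × Int) × String)) : PySem.Dict Int Int :=
  ventas.foldl (fun d v =>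
    if v.2.1.1 == year && v.2.1.2.1 == month then d.insert v.1 (d.getD v.1 0 + 1) else d)
    PySem.Dict.empty

-- qty[prod] = units of each product sold through those boletas
def pvQtyIdx (itemes : List (Int × Int × Int)) (boletas : PySem.Dict Int Int) : PySem.Dict Int Int :=
  itemes.foldl (fun d it =>
    if boletas.contains it.1 then d.insert it.2.1 (d.getD it.2.1 0 + it.2.2 * boletas.getD it.1 0) else d)
    PySem.Dict.empty

def total_ventas_del_mes_alt (year : Int) (month : Int) (itemes : List (Int × Int × Int)) (productos : List (Int × String × Int × Int)) (ventas : List (Int × (Int × Int × Int) × String)) : Int :=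
  let boletas := pvBoletasIdx year month ventas
  let qty := pvQtyIdx itemes boletas
  (productos.map (fun p => p.2.2.1 * qty.getD p.1 0)).sum

-- ===== PRECONDITION & SPEC =====
def Spec_total_ventas_del_mes (year : Int) (month : Int) (itemes : List (Int × Int × Int)) (productos : List (Int × String × Int × Int)) (ventas : List (Int × (Int × Int × Int) × String)) (out : Int) : Prop := out = total_ventas_del_mes_alt year month itemes productos ventas
instance (year : Int) (month : Int) (itemes : List (Int × Int × Int)) (productos : List (Int × String × Int × Int)) (ventas : List (Int × (Int × Int × Int) × String)) (out : Int) : Decidable (Spec_total_ventas_del_mes year month itemes productos ventas out) := by unfold Spec_total_ventas_del_mes; infer_instance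

-- ===== CLAIM =====
def Claim_equal_total_ventas_del_mes : Prop := ∀ (year : Int) (month : Int) (itemes : List (Int × Int × Int)) (productos : List (Int × String × Int × Int)) (ventas : List (Int × (Int × Int × Int) × String)), Dom_total_ventas_del_mes year month itemes productos ventas → Spec_total_ventas_del_mes year month itemes productos ventas (total_ventas_del_mes year month itemes productos ventas)

-- ===== LEMMAS AND PROOFS =====

-- mathematical readings
def pvCountB (year month : Int) (ventas : List (Int × (Int × Int × Int) × String)) (b : Int) : Int :=
  (ventas.map (fun v => if v.2.1.1 = year ∧ v.2.1.2.1 = month ∧ v.1 = b then (1 : Int) else 0)).sum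

def pvPsum (productos : List (Int × String × Int × Int)) (p : Int) : Int :=
  (productos.map (fun q => if q.1 = p then q.2.2.1 else 0)).sum

def pvSsum (itemes : List (Int × Int × Int)) (productos : List (Int × String × Int × Int)) (b : Int) : Int :=
  (itemes.map (fun it => if it.1 = b then it.2.2 * pvPsum productos it.2.1 else 0)).sum

def pvQtyVal (year month : Int) (ventas : List (Int × (Int × Int × Int) × String)) (itemes : List (Int × Int × Int)) (p : Int) : Int :=
  (itemes.map (fun it => if it.2.1 = p then it.2.2 * pvCountB year month ventas it.1 else 0)).sum

lemma pvSumMapAdd {α : Type} (l : List α) (f g : α → Int) :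
    (l.map (fun x => f x + g x)).sum = (l.map f).sum + (l.map g).sum := by
  induction l with
  | nil => simp
  | cons x xs ih => simp only [List.map_cons, List.sum_cons, ih]; ring

lemma pvSumMapZero {α : Type} (l : List α) (f : α → Int) (h : ∀ x ∈ l, f x = 0) :
    (l.map f).sum = 0 := by
  rw [List.map_congr_left h]; simp

lemma pvBoletasIdx_getD_aux (year month : Int) (ventas : List (Int × (Int × Int × Int) × String)) (d : PySem.Dict Int Int) (b : Int) :
    (ventas.foldl (fun d v =>
        if v.2.1.1 == year && v.2.1.2.1 == month then d.insert v.1 (d.getD v.1 0 + 1) else d) d).getD b 0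
      = d.getD b 0 + pvCountB year month ventas b := by
  induction ventas generalizing d with
  | nil => simp [pvCountB]
  | cons v rest ih =>
    simp only [List.foldl_cons, ih, pvCountB, List.map_cons, List.sum_cons]
    by_cases hm : (v.2.1.1 == year && v.2.1.2.1 == month) = true
    · rw [if_pos hm, PySem.Dict.getD_insert]
      simp only [Bool.and_eq_true, beq_iff_eq] at hm
      by_cases hb : b = v.1
      · rw [if_pos hb, if_pos ⟨hm.1, hm.2, hb.symm⟩, hb]; ring
      · rw [if_neg hb, if_neg (fun h => hb h.2.2.symm)]; ring
    · rw [if_neg hm]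
      simp only [Bool.and_eq_true, beq_iff_eq] at hm
      rw [if_neg (fun h => hm ⟨h.1, h.2.1⟩)]
      simp

lemma pvBoletasIdx_getD (year month : Int) (ventas : List (Int × (Int × Int × Int) × String)) (b : Int) :
    (pvBoletasIdx year month ventas).getD b 0 = pvCountB year month ventas b := by
  unfold pvBoletasIdx
  rw [pvBoletasIdx_getD_aux, PySem.Dict.getD_empty]
  ring

lemma pvFoldlContainsMono (year month : Int) (ventas : List (Int × (Int × Int × Int) × String)) (d : PySem.Dict Int Int) (b : Int)
    (h : d.contains b = true) :
    (ventas.foldl (fun d v =>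
        if v.2.1.1 == year && v.2.1.2.1 == month then d.insert v.1 (d.getD v.1 0 + 1) else d) d).contains b = true := by
  induction ventas generalizing d with
  | nil => exact h
  | cons v rest ih =>
    simp only [List.foldl_cons]
    apply ih
    by_cases hm : (v.2.1.1 == year && v.2.1.2.1 == month) = true
    · rw [if_pos hm, PySem.Dict.contains_insert, h]; simp
    · rwa [if_neg hm]

lemma pvBoletasIdx_not_contains (year month : Int) (ventas : List (Int × (Int × Int × Int) × String)) (d : PySem.Dict Int Int) (b : Int)
    (h : (ventas.foldl (fun d v =>
        if v.2.1.1 == year && v.2.1.2.1 == month then d.insert v.1 (d.getD v.1 0 + 1) else d) d).contains b ≠ true) :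
    pvCountB year month ventas b = 0 := by
  induction ventas generalizing d with
  | nil => simp [pvCountB]
  | cons v rest ih =>
    simp only [List.foldl_cons] at h
    simp only [pvCountB, List.map_cons, List.sum_cons]
    by_cases hm : (v.2.1.1 == year && v.2.1.2.1 == month) = true
    · rw [if_pos hm] at h
      have hb : ¬ b = v.1 := by
        intro hb
        exact h (pvFoldlContainsMono year month rest _ b
          (by rw [PySem.Dict.contains_insert, hb]; simp))
      rw [if_neg (fun hh => hb hh.2.2.symm)]
      have := ih (d.insert v.1 (d.getD v.1 0 + 1)) h
      simpa [pvCountB] using this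
    · rw [if_neg hm] at h
      simp only [Bool.and_eq_true, beq_iff_eq] at hm
      rw [if_neg (fun hh => hm ⟨hh.1, hh.2.1⟩)]
      have := ih d h
      simpa [pvCountB] using this

lemma pvQtyIdx_getD (year month : Int) (ventas : List (Int × (Int × Int × Int) × String)) (itemes : List (Int × Int × Int)) (d : PySem.Dict Int Int) (p : Int) :
    (itemes.foldl (fun d it =>
        if (pvBoletasIdx year month ventas).contains it.1 then
          d.insert it.2.1 (d.getD it.2.1 0 + it.2.2 * (pvBoletasIdx year month ventas).getD it.1 0)
        else d) d).getD p 0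
      = d.getD p 0 + pvQtyVal year month ventas itemes p := by
  induction itemes generalizing d with
  | nil => simp [pvQtyVal]
  | cons it rest ih =>
    simp only [List.foldl_cons, ih, pvQtyVal, List.map_cons, List.sum_cons]
    by_cases hc : (pvBoletasIdx year month ventas).contains it.1 = true
    · rw [if_pos hc, PySem.Dict.getD_insert, pvBoletasIdx_getD]
      by_cases hp : p = it.2.1
      · rw [if_pos hp, if_pos hp.symm, hp]; ring
      · rw [if_neg hp, if_neg (fun hh => hp hh.symm)]; ring
    · rw [if_neg hc]
      have h0 : pvCountB year month ventas it.1 = 0 := by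
        have := pvBoletasIdx_not_contains year month ventas PySem.Dict.empty it.1 hc
        exact this
      by_cases hp : it.2.1 = p
      · rw [if_pos hp, h0]
        simp [pvQtyVal]
      · rw [if_neg hp]
        simp [pvQtyVal]

-- the common double sum: Σ over itemes of cant * countB(bol) * pvPsum(prod)
def pvS (year month : Int) (itemes : List (Int × Int × Int)) (productos : List (Int × String × Int × Int)) (ventas : List (Int × (Int × Int × Int) × String)) : Int :=
  (itemes.map (fun it => it.2.2 * pvCountB year month ventas it.1 * pvPsum productos it.2.1)).sum

lemma pvQtyValMul (year month : Int) (ventas : List (Int × (Int × Int × Int) × String)) (itemes : List (Int × Int × Int)) (q : Int × String × Int × Int) :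
    q.2.2.1 * pvQtyVal year month ventas itemes q.1
      = (itemes.map (fun it => it.2.2 * pvCountB year month ventas it.1 * (if q.1 = it.2.1 then q.2.2.1 else 0))).sum := by
  unfold pvQtyVal
  induction itemes with
  | nil => simp
  | cons it rest2 ih2 =>
    simp only [List.map_cons, List.sum_cons, mul_add, ih2]
    congr 1
    by_cases h : it.2.1 = q.1
    · rw [if_pos h, if_pos h.symm]; ring
    · rw [if_neg h, if_neg (fun hh => h hh.symm)]; ring

-- B's catalogue pass equals pvS
lemma pvAltEqS (year month : Int) (itemes : List (Int × Int × Int)) (productos : List (Int × String × Int × Int)) (ventas : List (Int × (Int × Int × Int) × String)) :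
    (productos.map (fun p => p.2.2.1 * pvQtyVal year month ventas itemes p.1)).sum
      = pvS year month itemes productos ventas := by
  induction productos with
  | nil =>
    simp only [List.map_nil, List.sum_nil, pvS]
    exact (pvSumMapZero _ _ (fun it _ => by simp [pvPsum])).symm
  | cons q rest ih =>
    simp only [List.map_cons, List.sum_cons, ih, pvS]
    have hsplit : (itemes.map (fun it => it.2.2 * pvCountB year month ventas it.1 * pvPsum (q :: rest) it.2.1)).sum
        = (itemes.map (fun it => it.2.2 * pvCountB year month ventas it.1 * (if q.1 = it.2.1 then q.2.2.1 else 0))).sum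
          + (itemes.map (fun it => it.2.2 * pvCountB year month ventas it.1 * pvPsum rest it.2.1)).sum := by
      rw [← pvSumMapAdd]
      apply congrArg List.sum
      apply List.map_congr_left
      intro it _
      simp only [pvPsum, List.map_cons, List.sum_cons]
      ring
    rw [hsplit, pvQtyValMul]

-- A-side readings
lemma pvInnerA (productos : List (Int × String × Int × Int)) (prod cant t : Int) :
    productos.foldl (fun t2 p => if p.1 == prod then t2 + cant * p.2.2.1 else t2) t
      = t + cant * pvPsum productos prod := by
  induction productos generalizing t with
  | nil => simp [pvPsum]
  | cons q rest ih =>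
    simp only [List.foldl_cons, ih, pvPsum, List.map_cons, List.sum_cons]
    by_cases h : q.1 = prod
    · rw [if_pos (beq_iff_eq.mpr h), if_pos h]; ring
    · rw [if_neg (by simp [h]), if_neg h]; ring

lemma pvMiddleA (itemes : List (Int × Int × Int)) (productos : List (Int × String × Int × Int)) (boleta t : Int) :
    itemes.foldl (fun t it =>
        if it.1 == boleta then
          productos.foldl (fun t2 p => if p.1 == it.2.1 then t2 + it.2.2 * p.2.2.1 else t2) t
        else t) t
      = t + pvSsum itemes productos boleta := by
  induction itemes generalizing t with
  | nil => simp [pvSsum]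
  | cons it rest ih =>
    simp only [List.foldl_cons, ih, pvSsum, List.map_cons, List.sum_cons]
    by_cases h : it.1 = boleta
    · rw [if_pos (beq_iff_eq.mpr h), if_pos h, pvInnerA]; ring
    · rw [if_neg (by simp [h]), if_neg h]; ring

-- A's outer loop equals pvS (the swap of the ventas/itemes sums)
lemma pvOuterA (year month : Int) (itemes : List (Int × Int × Int)) (productos : List (Int × String × Int × Int)) (ventas : List (Int × (Int × Int × Int) × String)) (t : Int) :
    ventas.foldl (fun total v =>
        if v.2.1.1 == year && v.2.1.2.1 == month then
          itemes.foldl (fun t it =>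
            if it.1 == v.1 then
              productos.foldl (fun t2 p => if p.1 == it.2.1 then t2 + it.2.2 * p.2.2.1 else t2) t
            else t) total
        else total) t
      = t + pvS year month itemes productos ventas := by
  induction ventas generalizing t with
  | nil =>
    simp only [List.foldl_nil, pvS]
    rw [pvSumMapZero _ _ (fun it _ => by simp [pvCountB])]
    ring
  | cons v rest ih =>
    simp only [List.foldl_cons]
    rw [ih]
    have hsplit : pvS year month itemes productos (v :: rest)
        = (itemes.map (fun it => it.2.2 * (if v.2.1.1 = year ∧ v.2.1.2.1 = month ∧ v.1 = it.1 then (1:Int) else 0) * pvPsum productos it.2.1)).sum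
          + pvS year month itemes productos rest := by
      unfold pvS
      rw [← pvSumMapAdd]
      apply congrArg List.sum
      apply List.map_congr_left
      intro it _
      simp only [pvCountB, List.map_cons, List.sum_cons]
      ring
    rw [hsplit]
    by_cases hm : (v.2.1.1 == year && v.2.1.2.1 == month) = true
    · rw [if_pos hm, pvMiddleA]
      simp only [Bool.and_eq_true, beq_iff_eq] at hm
      have hfirst : (itemes.map (fun it => it.2.2 * (if v.2.1.1 = year ∧ v.2.1.2.1 = month ∧ v.1 = it.1 then (1:Int) else 0) * pvPsum productos it.2.1)).sum
          = pvSsum itemes productos v.1 := by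
        unfold pvSsum
        apply congrArg List.sum
        apply List.map_congr_left
        intro it _
        by_cases hb : it.1 = v.1
        · rw [if_pos ⟨hm.1, hm.2, hb.symm⟩, if_pos hb]; ring
        · rw [if_neg (fun hh => hb hh.2.2.symm), if_neg hb]; ring
      rw [hfirst]; ring
    · rw [if_neg hm]
      simp only [Bool.and_eq_true, beq_iff_eq] at hm
      have hfirst : (itemes.map (fun it => it.2.2 * (if v.2.1.1 = year ∧ v.2.1.2.1 = month ∧ v.1 = it.1 then (1:Int) else 0) * pvPsum productos it.2.1)).sum = 0 := by
        have : ∀ it ∈ itemes, it.2.2 * (if v.2.1.1 = year ∧ v.2.1.2.1 = month ∧ v.1 = it.1 then (1:Int) else 0) * pvPsum productos it.2.1 = 0 := by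
          intro it _
          rw [if_neg (fun hh => hm ⟨hh.1, hh.2.1⟩)]; ring
        rw [List.map_congr_left this]
        simp
      rw [hfirst]; ring

-- ===== VERDICT =====
theorem total_ventas_del_mes_spec : Claim_equal_total_ventas_del_mes := by
  intro year month itemes productos ventas _
  unfold Spec_total_ventas_del_mes total_ventas_del_mes total_ventas_del_mes_alt
  rw [pvOuterA]
  have hB : (productos.map (fun p => p.2.2.1 * (pvQtyIdx itemes (pvBoletasIdx year month ventas)).getD p.1 0)).sum
      = (productos.map (fun p => p.2.2.1 * pvQtyVal year month ventas itemes p.1)).sum := by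
    apply congrArg List.sum
    apply List.map_congr_left
    intro p _
    have := pvQtyIdx_getD year month ventas itemes PySem.Dict.empty p.1
    unfold pvQtyIdx
    rw [this, PySem.Dict.getD_empty]
    ring
  rw [hB, pvAltEqS]
  ring
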